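-- pv_equiv track=rewrite | github.com/unslothai/unsloth-zoo | unsloth_zoo/mlx_compile.py | _build_cu_seqlens
-- ===== SOURCE A (Python) =====
-- def _build_cu_seqlens(grid_thw):
--     """Build cumulative sequence lengths from normalized `(t, h, w)` grids."""
--
--     cu_seqlens = [0]
--     total = 0
--     for num_frames, height, width in grid_thw:
--         frame_tokens = int(height) * int(width)
--         for _ in range(int(num_frames)):
--             total += frame_tokens
--             cu_seqlens.append(total)
--     return tuple(cu_seqlens)
-- ===== SOURCE B (Python) =====
-- def _build_cu_seqlens(grid_thw):
--     """Build cumulative sequence lengths from normalized `(t, h, w)` grids."""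
--     # Stage 1: per-grid (frame count, tokens per frame), clamping negative counts to 0.
--     per = [(max(int(t), 0), int(h) * int(w)) for t, h, w in grid_thw]
--     # Stage 2: starting offset of each grid's block (one addition per grid, not per frame).
--     starts, s = [], 0
--     for t, tok in per:
--         starts.append(s)
--         s += t * tok
--     # Stage 3: each entry is computed in closed form: block start + k * tokens.
--     return (0,) + tuple(s + k * tok
--                         for (t, tok), s in zip(per, starts)
--                         for k in range(1, t + 1))
-- ===== Notes on version B (the rewrite author's own statement) =====
-- stated objective: alternative
-- what changed: Instead of A's fused nested loop that appends a running total once per frame, B computes each entry independently in closed form (block start + k * tokens): it first builds per-grid (frames, tokens) pairs, then block starting offsets with one addition per grid, then materializes every entry by multiplication.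
import Mathlib
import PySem

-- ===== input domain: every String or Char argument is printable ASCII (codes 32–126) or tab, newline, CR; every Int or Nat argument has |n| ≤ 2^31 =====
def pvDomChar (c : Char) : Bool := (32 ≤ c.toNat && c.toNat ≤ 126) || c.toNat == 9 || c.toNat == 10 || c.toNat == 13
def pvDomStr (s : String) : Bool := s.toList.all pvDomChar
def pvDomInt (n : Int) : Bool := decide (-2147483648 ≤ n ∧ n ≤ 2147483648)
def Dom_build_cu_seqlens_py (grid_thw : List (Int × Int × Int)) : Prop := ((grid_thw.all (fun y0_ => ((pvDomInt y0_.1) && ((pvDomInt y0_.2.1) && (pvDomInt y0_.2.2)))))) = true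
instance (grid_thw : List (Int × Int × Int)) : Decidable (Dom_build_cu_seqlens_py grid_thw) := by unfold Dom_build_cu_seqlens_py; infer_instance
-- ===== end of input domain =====

-- B computes each cumulative entry in closed form (block start + k * tokens) from staged
-- per-grid tables, instead of A's fused nested loop appending a running total per frame.

-- ===== PORT A =====
def build_cu_seqlens_py (grid_thw : List (Int × Int × Int)) : List Int :=
  (grid_thw.foldl
    (fun (st : List Int × Int) thw =>
      let frame_tokens := thw.2.1 * thw.2.2
      (PySem.List.pyRange 0 thw.1 1).foldl
        (fun (st : List Int × Int) _ => (st.1 ++ [st.2 + frame_tokens], st.2 + frame_tokens))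
        st)
    ([0], 0)).1

-- ===== PORT B =====
def build_cu_seqlens_py_alt (grid_thw : List (Int × Int × Int)) : List Int :=
  let per := grid_thw.map (fun thw => (max thw.1 0, thw.2.1 * thw.2.2))
  let starts := (per.foldl
    (fun (st : List Int × Int) p => (st.1 ++ [st.2], st.2 + p.1 * p.2)) ([], 0)).1
  0 :: (per.zip starts).flatMap
    (fun ps => (PySem.List.pyRange 1 (ps.1.1 + 1) 1).map (fun k => ps.2 + k * ps.1.2))

-- ===== PRECONDITION & SPEC =====
def Spec_build_cu_seqlens_py (grid_thw : List (Int × Int × Int)) (out : List Int) : Prop := out = build_cu_seqlens_py_alt grid_thw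
instance (grid_thw : List (Int × Int × Int)) (out : List Int) : Decidable (Spec_build_cu_seqlens_py grid_thw out) := by unfold Spec_build_cu_seqlens_py; infer_instance

-- ===== CLAIM (what is proved, stated in full; the proofs are below) =====
def Claim_equal_build_cu_seqlens_py : Prop := ∀ (grid_thw : List (Int × Int × Int)), Dom_build_cu_seqlens_py grid_thw → Spec_build_cu_seqlens_py grid_thw (build_cu_seqlens_py grid_thw)

-- ===== LEMMAS AND PROOFS =====

/-- Block starting offsets: a running offset, one step per grid entry. -/
def pvStarts (s : Int) : List (Int × Int) → List Int
  | [] => []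
  | p :: ps => s :: pvStarts (s + p.1 * p.2) ps

theorem pvStarts_fold (per : List (Int × Int)) : ∀ (acc : List Int) (s : Int),
    (per.foldl (fun (st : List Int × Int) p => (st.1 ++ [st.2], st.2 + p.1 * p.2)) (acc, s)).1
      = acc ++ pvStarts s per := by
  induction per with
  | nil => intro acc s; simp [pvStarts]
  | cons p ps ih => intro acc s; simp [List.foldl_cons, ih, pvStarts]

/-- A's inner frame loop, in closed form: generic over any list of length `n`. -/
theorem pvInnerNat (tok : Int) (r : List Int) : ∀ (l : List Int) (base : Int),
    r.foldl (fun (st : List Int × Int) _ => (st.1 ++ [st.2 + tok], st.2 + tok)) (l, base)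
      = (l ++ (List.range r.length).map (fun (k : Nat) => base + ((k : Int) + 1) * tok),
         base + (r.length : Int) * tok) := by
  induction r with
  | nil => intro l base; simp
  | cons a r' ih =>
    intro l base
    simp only [List.foldl_cons, ih, List.length_cons, Prod.mk.injEq]
    refine ⟨?_, ?_⟩
    · rw [List.range_succ_eq_map]
      simp only [List.map_cons, List.map_map, List.append_assoc, List.singleton_append]
      congr 1
      congr 1
      · ring
      · apply List.map_congr_left; intro k _; simp [Function.comp]; ring
    · push_cast; ring

/-- A's inner loop over `range(t)` equals B's closed-form block, plus the offset bump. -/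
theorem pvInner (t tok : Int) (l : List Int) (base : Int) :
    (PySem.List.pyRange 0 t 1).foldl
      (fun (st : List Int × Int) _ => (st.1 ++ [st.2 + tok], st.2 + tok)) (l, base)
      = (l ++ (PySem.List.pyRange 1 (max t 0 + 1) 1).map (fun k => base + k * tok),
         base + max t 0 * tok) := by
  rw [pvInnerNat]
  have hlen : (PySem.List.pyRange 0 t 1).length = t.toNat := by
    rw [PySem.List.length_pyRange_one]; simp
  have hmax : ((t.toNat : Int)) = max t 0 := by omega
  simp only [Prod.mk.injEq]
  refine ⟨?_, ?_⟩
  · rw [hlen, PySem.List.pyRange_one 1 (max t 0 + 1), List.map_map]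
    have h2 : ((max t 0 + 1 - 1).toNat) = t.toNat := by omega
    rw [h2]
    congr 1
    apply List.map_congr_left; intro k _; simp only [Function.comp_apply]; ring
  · rw [hlen, hmax]

/-- Outer loop invariant: A's fold equals B's zip/flatMap body over `pvStarts`. -/
theorem pvOuter (grid : List (Int × Int × Int)) : ∀ (l : List Int) (base : Int),
    grid.foldl
      (fun (st : List Int × Int) thw =>
        let frame_tokens := thw.2.1 * thw.2.2
        (PySem.List.pyRange 0 thw.1 1).foldl
          (fun (st : List Int × Int) _ => (st.1 ++ [st.2 + frame_tokens], st.2 + frame_tokens))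
          st)
      (l, base)
    = (l ++ ((grid.map (fun thw => (max thw.1 0, thw.2.1 * thw.2.2))).zip
              (pvStarts base (grid.map (fun thw => (max thw.1 0, thw.2.1 * thw.2.2))))).flatMap
          (fun ps => (PySem.List.pyRange 1 (ps.1.1 + 1) 1).map (fun k => ps.2 + k * ps.1.2)),
       base + (grid.map (fun thw => max thw.1 0 * (thw.2.1 * thw.2.2))).sum) := by
  induction grid with
  | nil => intro l base; simp [pvStarts]
  | cons thw grid' ih =>
    intro l base
    simp only [List.foldl_cons, List.map_cons, pvStarts, List.zip_cons_cons,
      List.flatMap_cons, List.sum_cons]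
    rw [pvInner, ih]
    simp only [List.append_assoc, Prod.mk.injEq]
    exact ⟨by simp, by ring⟩

-- ===== VERDICT (by name: the statement is the Claim_ definition above) =====
theorem build_cu_seqlens_py_spec : Claim_equal_build_cu_seqlens_py := by
  intro grid _
  unfold Spec_build_cu_seqlens_py build_cu_seqlens_py build_cu_seqlens_py_alt
  simp only [pvOuter, pvStarts_fold]
  simp
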